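-- pv_equiv track=rewrite | github.com/CristhianMotoche/computer-vision | tarea-2/text_character_detection.py | classify_text_type
-- ===== SOURCE A (Python) =====
-- def classify_text_type(text: str) -> str:
--     """Clasificar el tipo de texto detectado"""
--     text = text.strip()
--     if not text:
--         return "unknown"
--
--     # Solo letras
--     if text.isalpha():
--         return "letters"
--     # Solo números
--     elif text.isdigit():
--         return "numbers"
--     # Contiene letras y números
--     elif any(c.isalpha() for c in text) and any(c.isdigit() for c in text):
--         return "mixed"
--     # Otros caracteres (símbolos, puntuación, etc.)
--     else:
--         return "symbols"
-- ===== SOURCE B (Python) =====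
-- def classify_text_type(text: str) -> str:
--     t = text.strip()
--     n = len(t)
--     if n == 0:
--         return "unknown"
--     n_alpha = 0
--     n_digit = 0
--     for c in t:
--         if c.isalpha():
--             n_alpha += 1
--         if c.isdigit():
--             n_digit += 1
--     if n_alpha == n:
--         return "letters"
--     if n_digit == n:
--         return "numbers"
--     if n_alpha > 0 and n_digit > 0:
--         return "mixed"
--     return "symbols"
-- ===== Notes on version B (the rewrite author's own statement) =====
-- stated objective: alternative
-- what changed: Replaces A's four separate whole-string scans (isalpha, isdigit, two any-generators) by one single pass accumulating alpha/digit counts, deciding the category from the counts afterwards.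
import Mathlib
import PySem

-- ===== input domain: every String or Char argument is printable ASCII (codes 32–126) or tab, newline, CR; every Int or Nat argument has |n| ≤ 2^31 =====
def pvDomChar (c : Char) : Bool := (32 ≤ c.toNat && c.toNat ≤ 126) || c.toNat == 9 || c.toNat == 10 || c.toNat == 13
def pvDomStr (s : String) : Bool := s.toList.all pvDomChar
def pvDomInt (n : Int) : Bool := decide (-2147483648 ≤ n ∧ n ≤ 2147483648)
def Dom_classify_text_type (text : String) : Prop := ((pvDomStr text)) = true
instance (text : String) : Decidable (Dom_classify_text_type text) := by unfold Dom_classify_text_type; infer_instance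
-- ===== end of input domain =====

-- B replaces A's four separate whole-string scans by one single counting pass (objective: alternative).

-- ===== PORT A =====
def classify_text_type (text : String) : String :=
  let t := PySem.Str.strip text
  if t = "" then "unknown"
  else if PySem.Str.strIsalpha t then "letters"
  else if PySem.Str.strIsdigit t then "numbers"
  else if t.toList.any PySem.Chars.isalpha && t.toList.any PySem.Chars.isdigit then "mixed"
  else "symbols"

-- ===== PORT B =====
def classify_text_type_alt (text : String) : String :=
  let cs := (PySem.Str.strip text).toList
  let n := cs.length
  if n = 0 then "unknown"
  else
    let p := cs.foldl (fun (p : Nat × Nat) c =>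
      ((if PySem.Chars.isalpha c then p.1 + 1 else p.1),
       (if PySem.Chars.isdigit c then p.2 + 1 else p.2))) (0, 0)
    if p.1 = n then "letters"
    else if p.2 = n then "numbers"
    else if 0 < p.1 && 0 < p.2 then "mixed"
    else "symbols"

-- ===== PRECONDITION & SPEC =====
def Spec_classify_text_type (text : String) (out : String) : Prop := out = classify_text_type_alt text
instance (text : String) (out : String) : Decidable (Spec_classify_text_type text out) := by unfold Spec_classify_text_type; infer_instance

-- ===== CLAIM (what is proved, stated in full; the proofs are below) =====
def Claim_equal_classify_text_type : Prop := ∀ (text : String), Dom_classify_text_type text → Spec_classify_text_type text (classify_text_type text)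

-- ===== LEMMAS AND PROOFS =====

-- The counting fold of B computes the two countP's.
theorem pv_fold_counts (cs : List Char) (a b : Nat) :
    cs.foldl (fun (p : Nat × Nat) c =>
      ((if PySem.Chars.isalpha c then p.1 + 1 else p.1),
       (if PySem.Chars.isdigit c then p.2 + 1 else p.2))) (a, b)
    = (a + cs.countP PySem.Chars.isalpha, b + cs.countP PySem.Chars.isdigit) := by
  induction cs generalizing a b with
  | nil => simp
  | cons c cs ih =>
    simp only [List.foldl_cons, List.countP_cons, ih]
    by_cases h1 : PySem.Chars.isalpha c <;> by_cases h2 : PySem.Chars.isdigit c <;>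
      simp [h1, h2] <;> omega

theorem pv_empty_iff (t : String) : t = "" ↔ t.toList = [] := by
  constructor
  · intro h; simp [h]
  · intro h
    have := congrArg String.ofList h
    simpa using this

-- ===== VERDICT (by name: the statement is the Claim_ definition above) =====
theorem classify_text_type_spec : Claim_equal_classify_text_type := by
  intro text _
  unfold Spec_classify_text_type classify_text_type classify_text_type_alt
  simp only [pv_fold_counts, Nat.zero_add]
  set cs := (PySem.Str.strip text).toList with hcs
  by_cases hempty : PySem.Str.strip text = ""
  · have : cs = [] := by rw [hcs, (pv_empty_iff _).mp hempty]
    simp [hempty, this]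
  · have hne : cs ≠ [] := fun h => hempty ((pv_empty_iff _).mpr (hcs ▸ h))
    have hlen : cs.length ≠ 0 := by simpa [List.length_eq_zero_iff] using hne
    simp only [if_neg hempty, if_neg hlen]
    have halpha : PySem.Str.strIsalpha (PySem.Str.strip text)
        = decide (cs.countP PySem.Chars.isalpha = cs.length) := by
      simp only [PySem.Str.strIsalpha_eq, PySem.Chars.strIsalpha, ← hcs]
      rw [Bool.eq_iff_iff]
      simp only [List.countP_eq_length, List.all_eq_true, Bool.and_eq_true,
        Bool.not_eq_true', List.isEmpty_eq_false_iff, decide_eq_true_eq]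
      exact ⟨fun h => h.2, fun h => ⟨hne, h⟩⟩
    have hdigit : PySem.Str.strIsdigit (PySem.Str.strip text)
        = decide (cs.countP PySem.Chars.isdigit = cs.length) := by
      simp only [PySem.Str.strIsdigit_eq, PySem.Chars.strIsdigit, ← hcs]
      rw [Bool.eq_iff_iff]
      simp only [List.countP_eq_length, List.all_eq_true, Bool.and_eq_true,
        Bool.not_eq_true', List.isEmpty_eq_false_iff, decide_eq_true_eq]
      exact ⟨fun h => h.2, fun h => ⟨hne, h⟩⟩
    have hany : (cs.any PySem.Chars.isalpha && cs.any PySem.Chars.isdigit)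
        = (decide (0 < cs.countP PySem.Chars.isalpha) && decide (0 < cs.countP PySem.Chars.isdigit)) := by
      rw [Bool.eq_iff_iff]
      simp [List.any_eq_true, List.countP_pos_iff]
    rw [halpha, hdigit, hany]
    by_cases h1 : cs.countP PySem.Chars.isalpha = cs.length <;>
      by_cases h2 : cs.countP PySem.Chars.isdigit = cs.length <;>
        by_cases h3 : 0 < cs.countP PySem.Chars.isalpha <;>
          by_cases h4 : 0 < cs.countP PySem.Chars.isdigit <;>
            simp [h1, h2, h3, h4]
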